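-- pv_equiv track=rewrite | github.com/hendrixed/nfl-betting-analyzer | player_identity_resolver.py | _check_nickname_patterns
-- ===== SOURCE A (Python) =====
-- def _check_nickname_patterns(name1: str, name2: str) -> bool:
--     """Check for common nickname patterns"""
--
--     # Common nickname mappings
--     nicknames = {
--         'william': ['bill', 'billy', 'will'],
--         'robert': ['bob', 'bobby', 'rob', 'robby'],
--         'richard': ['rick', 'ricky', 'dick'],
--         'michael': ['mike', 'mickey'],
--         'christopher': ['chris'],
--         'anthony': ['tony'],
--         'benjamin': ['ben', 'benny'],
--         'alexander': ['alex'],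
--         'jonathan': ['jon', 'johnny'],
--         'matthew': ['matt'],
--         'andrew': ['andy', 'drew'],
--         'joshua': ['josh'],
--         'daniel': ['dan', 'danny'],
--         'david': ['dave', 'davey'],
--         'james': ['jim', 'jimmy', 'jamie'],
--         'john': ['johnny', 'jack'],
--         'thomas': ['tom', 'tommy']
--     }
--
--     name1_parts = name1.split()
--     name2_parts = name2.split()
--
--     for part1 in name1_parts:
--         for part2 in name2_parts:
--             # Check if one is a nickname of the other
--             for full_name, nicks in nicknames.items():
--                 if (part1 == full_name and part2 in nicks) or (part2 == full_name and part1 in nicks):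
--                     return True
--                 if part1 in nicks and part2 in nicks:  # Both are nicknames of same name
--                     return True
--
--     return False
-- ===== SOURCE B (Python) =====
-- _FULLS = {
--     'william', 'robert', 'richard', 'michael', 'christopher', 'anthony',
--     'benjamin', 'alexander', 'jonathan', 'matthew', 'andrew', 'joshua',
--     'daniel', 'david', 'james', 'john', 'thomas',
-- }
--
-- # inverted index: (nickname, canonical full name)
-- _NICK_PAIRS = [
--     ('bill', 'william'), ('billy', 'william'), ('will', 'william'),
--     ('bob', 'robert'), ('bobby', 'robert'), ('rob', 'robert'), ('robby', 'robert'),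
--     ('rick', 'richard'), ('ricky', 'richard'), ('dick', 'richard'),
--     ('mike', 'michael'), ('mickey', 'michael'),
--     ('chris', 'christopher'),
--     ('tony', 'anthony'),
--     ('ben', 'benjamin'), ('benny', 'benjamin'),
--     ('alex', 'alexander'),
--     ('jon', 'jonathan'), ('johnny', 'jonathan'),
--     ('matt', 'matthew'),
--     ('andy', 'andrew'), ('drew', 'andrew'),
--     ('josh', 'joshua'),
--     ('dan', 'daniel'), ('danny', 'daniel'),
--     ('dave', 'david'), ('davey', 'david'),
--     ('jim', 'james'), ('jimmy', 'james'), ('jamie', 'james'),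
--     ('johnny', 'john'), ('jack', 'john'),
--     ('tom', 'thomas'), ('tommy', 'thomas'),
-- ]
--
--
-- def _full_set(tokens):
--     """Group ids (canonical full names) hit by a token that IS the full name."""
--     return {t for t in tokens if t in _FULLS}
--
--
-- def _nick_set(tokens):
--     """Group ids hit by a token that is a nickname, via the inverted index."""
--     return {full for t in tokens for (nick, full) in _NICK_PAIRS if t == nick}
--
--
-- def _check_nickname_patterns(name1: str, name2: str) -> bool:
--     """Role-set formulation over an inverted nickname index: the names match iff
--     some group is reached from both names, not both times via the full name alone."""
--     t1 = name1.split()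
--     t2 = name2.split()
--     f1, n1 = _full_set(t1), _nick_set(t1)
--     f2, n2 = _full_set(t2), _nick_set(t2)
--     return bool((n1 & n2) or (n1 & f2) or (f1 & n2))
-- ===== Notes on version B (the rewrite author's own statement) =====
-- stated objective: alternative
-- what changed: Replaces A's nested part1 x part2 x group scan with a role-set formulation over an inverted (nickname -> full name) index: each name is mapped once to the set of groups it hits as a full name and as a nickname, and the answer is whether three set intersections (nick/nick, nick/full, full/nick) are non-empty.
import Mathlib
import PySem

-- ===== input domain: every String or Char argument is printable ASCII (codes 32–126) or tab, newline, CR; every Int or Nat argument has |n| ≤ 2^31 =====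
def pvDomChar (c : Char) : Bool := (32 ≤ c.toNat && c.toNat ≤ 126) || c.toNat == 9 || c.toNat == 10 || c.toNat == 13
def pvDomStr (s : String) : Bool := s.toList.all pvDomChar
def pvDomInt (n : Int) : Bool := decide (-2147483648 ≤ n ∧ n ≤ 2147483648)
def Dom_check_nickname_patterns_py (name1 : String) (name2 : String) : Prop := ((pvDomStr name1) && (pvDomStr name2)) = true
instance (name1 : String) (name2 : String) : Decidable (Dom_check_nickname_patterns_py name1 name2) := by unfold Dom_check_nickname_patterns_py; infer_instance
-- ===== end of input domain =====

-- B replaces A's nested part1 × part2 × group scan by a role-set formulation over an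
-- inverted (nickname → full name) index and three set-intersection tests (objective: alternative).

-- ===== PORT A =====
-- the 'nicknames' dict literal of A, in insertion order
def pvNicknamesA : List (String × List String) :=
  [("william", ["bill", "billy", "will"]),
   ("robert", ["bob", "bobby", "rob", "robby"]),
   ("richard", ["rick", "ricky", "dick"]),
   ("michael", ["mike", "mickey"]),
   ("christopher", ["chris"]),
   ("anthony", ["tony"]),
   ("benjamin", ["ben", "benny"]),
   ("alexander", ["alex"]),
   ("jonathan", ["jon", "johnny"]),
   ("matthew", ["matt"]),
   ("andrew", ["andy", "drew"]),
   ("joshua", ["josh"]),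
   ("daniel", ["dan", "danny"]),
   ("david", ["dave", "davey"]),
   ("james", ["jim", "jimmy", "jamie"]),
   ("john", ["johnny", "jack"]),
   ("thomas", ["tom", "tommy"])]

-- literal port of A: for part1 … for part2 … for (full_name, nicks) … with early returns ⇒ nested List.any
def check_nickname_patterns_py (name1 : String) (name2 : String) : Bool :=
  let name1_parts := PySem.Str.split₀ name1
  let name2_parts := PySem.Str.split₀ name2
  name1_parts.any fun part1 =>
    name2_parts.any fun part2 =>
      pvNicknamesA.any fun g =>
        ((part1 == g.1 && g.2.contains part2) || (part2 == g.1 && g.2.contains part1))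
          || (g.2.contains part1 && g.2.contains part2)

-- ===== PORT B =====
-- Source B's _FULLS set literal
def pvFulls : PySem.Set String :=
  PySem.Set.ofList
    ["william", "robert", "richard", "michael", "christopher", "anthony",
     "benjamin", "alexander", "jonathan", "matthew", "andrew", "joshua",
     "daniel", "david", "james", "john", "thomas"]

-- Source B's inverted index _NICK_PAIRS: (nickname, canonical full name)
def pvNickPairs : List (String × String) :=
  [("bill", "william"), ("billy", "william"), ("will", "william"),
   ("bob", "robert"), ("bobby", "robert"), ("rob", "robert"), ("robby", "robert"),
   ("rick", "richard"), ("ricky", "richard"), ("dick", "richard"),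
   ("mike", "michael"), ("mickey", "michael"),
   ("chris", "christopher"),
   ("tony", "anthony"),
   ("ben", "benjamin"), ("benny", "benjamin"),
   ("alex", "alexander"),
   ("jon", "jonathan"), ("johnny", "jonathan"),
   ("matt", "matthew"),
   ("andy", "andrew"), ("drew", "andrew"),
   ("josh", "joshua"),
   ("dan", "daniel"), ("danny", "daniel"),
   ("dave", "david"), ("davey", "david"),
   ("jim", "james"), ("jimmy", "james"), ("jamie", "james"),
   ("johnny", "john"), ("jack", "john"),
   ("tom", "thomas"), ("tommy", "thomas")]

-- Source B's _full_set: {t for t in tokens if t in _FULLS}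
def pvFullSet (tokens : List String) : PySem.Set String :=
  PySem.Set.ofList (tokens.filter fun t => PySem.Set.contains pvFulls t)

-- Source B's _nick_set: {full for t in tokens for (nick, full) in _NICK_PAIRS if t == nick}
def pvNickSet (tokens : List String) : PySem.Set String :=
  PySem.Set.ofList
    (tokens.flatMap fun t => pvNickPairs.filterMap fun pr => if t == pr.1 then some pr.2 else none)

-- literal port of B (Source B): role sets via the inverted index, three intersection tests
def check_nickname_patterns_py_alt (name1 : String) (name2 : String) : Bool :=
  let t1 := PySem.Str.split₀ name1
  let t2 := PySem.Str.split₀ name2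
  let f1 := pvFullSet t1
  let n1 := pvNickSet t1
  let f2 := pvFullSet t2
  let n2 := pvNickSet t2
  !(PySem.Set.inter n1 n2).isEmpty || !(PySem.Set.inter n1 f2).isEmpty
    || !(PySem.Set.inter f1 n2).isEmpty

-- ===== PRECONDITION & SPEC =====
def Spec_check_nickname_patterns_py (name1 : String) (name2 : String) (out : Bool) : Prop := out = check_nickname_patterns_py_alt name1 name2
instance (name1 : String) (name2 : String) (out : Bool) : Decidable (Spec_check_nickname_patterns_py name1 name2 out) := by unfold Spec_check_nickname_patterns_py; infer_instance

-- ===== CLAIM (what is proved, stated in full; the proofs are below) =====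
def Claim_equal_check_nickname_patterns_py : Prop := ∀ (name1 : String) (name2 : String), Dom_check_nickname_patterns_py name1 name2 → Spec_check_nickname_patterns_py name1 name2 (check_nickname_patterns_py name1 name2)

-- ===== LEMMAS AND PROOFS =====

-- B's inverted index lists exactly the (nick, full) pairs of A's table
lemma pv_pairs_eq : pvNickPairs = pvNicknamesA.flatMap (fun g => g.2.map fun n => (n, g.1)) := by
  decide

-- B's _FULLS is exactly the set of keys of A's table
lemma pv_fulls_eq : pvFulls = pvNicknamesA.map Prod.fst := by decide

-- keys of A's table are unique: equal keys determine equal nick lists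
lemma pv_unique : ∀ g ∈ pvNicknamesA, ∀ g' ∈ pvNicknamesA, g.1 = g'.1 → g.2 = g'.2 := by decide

-- membership in B's full-name role set
lemma pv_mem_fullSet (tokens : List String) (x : String) :
    x ∈ pvFullSet tokens ↔ x ∈ tokens ∧ ∃ g ∈ pvNicknamesA, x = g.1 := by
  unfold pvFullSet
  rw [PySem.Set.mem_ofList, List.mem_filter, pv_fulls_eq]
  simp [List.mem_map, eq_comm]

-- membership in B's nickname role set
lemma pv_mem_nickSet (tokens : List String) (x : String) :
    x ∈ pvNickSet tokens ↔ ∃ t ∈ tokens, ∃ g ∈ pvNicknamesA, x = g.1 ∧ t ∈ g.2 := by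
  unfold pvNickSet
  rw [PySem.Set.mem_ofList, List.mem_flatMap]
  constructor
  · rintro ⟨t, ht, hx⟩
    rw [List.mem_filterMap] at hx
    obtain ⟨pr, hpr, hif⟩ := hx
    have hte : t = pr.1 ∧ x = pr.2 := by
      by_cases h : t = pr.1
      · exact ⟨h, by simpa [h] using hif.symm⟩
      · simp [h] at hif
    rw [pv_pairs_eq, List.mem_flatMap] at hpr
    obtain ⟨g, hg, hmem⟩ := hpr
    rw [List.mem_map] at hmem
    obtain ⟨n, hn, rfl⟩ := hmem
    exact ⟨t, ht, g, hg, hte.2, hte.1 ▸ hn⟩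
  · rintro ⟨t, ht, g, hg, rfl, htn⟩
    refine ⟨t, ht, ?_⟩
    rw [List.mem_filterMap]
    refine ⟨(t, g.1), ?_, by simp⟩
    rw [pv_pairs_eq, List.mem_flatMap]
    exact ⟨g, hg, by rw [List.mem_map]; exact ⟨t, htn, rfl⟩⟩

lemma pv_main (p1 p2 : List String) :
    (p1.any fun part1 => p2.any fun part2 => pvNicknamesA.any fun g =>
        ((part1 == g.1 && g.2.contains part2) || (part2 == g.1 && g.2.contains part1))
          || (g.2.contains part1 && g.2.contains part2))
    = (!(PySem.Set.inter (pvNickSet p1) (pvNickSet p2)).isEmpty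
        || !(PySem.Set.inter (pvNickSet p1) (pvFullSet p2)).isEmpty
        || !(PySem.Set.inter (pvFullSet p1) (pvNickSet p2)).isEmpty) := by
  rw [Bool.eq_iff_iff]
  simp only [List.any_eq_true, Bool.or_eq_true, Bool.and_eq_true, beq_iff_eq,
    List.contains_eq_mem, decide_eq_true_eq, Bool.not_eq_true',
    List.isEmpty_eq_false_iff_exists_mem, PySem.Set.mem_inter,
    pv_mem_fullSet, pv_mem_nickSet]
  constructor
  · rintro ⟨a, ha, b, hb, g, hg, (⟨haf, hbn⟩ | ⟨hbf, han⟩) | ⟨han, hbn⟩⟩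
    · exact Or.inr ⟨g.1, ⟨haf ▸ ha, g, hg, rfl⟩, ⟨b, hb, g, hg, rfl, hbn⟩⟩
    · exact Or.inl (Or.inr ⟨g.1, ⟨a, ha, g, hg, rfl, han⟩, ⟨hbf ▸ hb, g, hg, rfl⟩⟩)
    · exact Or.inl (Or.inl ⟨g.1, ⟨a, ha, g, hg, rfl, han⟩, ⟨b, hb, g, hg, rfl, hbn⟩⟩)
  · intro h
    rcases h with (⟨x, h1, h2⟩ | ⟨x, h1, h2⟩) | ⟨x, h1, h2⟩
    · obtain ⟨a, ha, g, hg, hxg, han⟩ := h1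
      obtain ⟨b, hb, g', hg', hxg', hbn⟩ := h2
      have he : g'.2 = g.2 := pv_unique g' hg' g hg (hxg'.symm.trans hxg)
      exact ⟨a, ha, b, hb, g, hg, Or.inr ⟨han, he ▸ hbn⟩⟩
    · obtain ⟨a, ha, g, hg, hxg, han⟩ := h1
      obtain ⟨hxp, -⟩ := h2
      exact ⟨a, ha, x, hxp, g, hg, Or.inl (Or.inr ⟨hxg, han⟩)⟩
    · obtain ⟨hxp, -⟩ := h1
      obtain ⟨b, hb, g, hg, hxg, hbn⟩ := h2
      exact ⟨x, hxp, b, hb, g, hg, Or.inl (Or.inl ⟨hxg, hbn⟩)⟩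

-- ===== VERDICT (by name: the statement is the Claim_ definition above) =====
theorem check_nickname_patterns_py_spec : Claim_equal_check_nickname_patterns_py := by
  intro name1 name2 _
  unfold Spec_check_nickname_patterns_py check_nickname_patterns_py check_nickname_patterns_py_alt
  exact pv_main _ _
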